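-- pv_equiv track=rewrite | github.com/dotaku1992/Algorithm | Baekjoon/28455.py | getstatFromlv
-- ===== SOURCE A (Python) =====
-- def getstatFromlv(lv: int):
--     union = [60, 100, 140, 200, 250]
--     stat = 0
--     for ele in union:
--         if ele <= lv:
--             stat += 1
--         else:
--             break
--     return stat
-- ===== SOURCE B (Python) =====
-- import bisect
--
-- def getstatFromlv(lv: int):
--     union = [60, 100, 140, 200, 250]
--     return bisect.bisect_right(union, lv)
-- ===== Notes on version B (the rewrite author's own statement) =====
-- stated objective: idiomatic
-- what changed: Replaced the linear early-breaking scan over the sorted thresholds with bisect.bisect_right, a binary search that directly yields the count of thresholds <= lv.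
import Mathlib
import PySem

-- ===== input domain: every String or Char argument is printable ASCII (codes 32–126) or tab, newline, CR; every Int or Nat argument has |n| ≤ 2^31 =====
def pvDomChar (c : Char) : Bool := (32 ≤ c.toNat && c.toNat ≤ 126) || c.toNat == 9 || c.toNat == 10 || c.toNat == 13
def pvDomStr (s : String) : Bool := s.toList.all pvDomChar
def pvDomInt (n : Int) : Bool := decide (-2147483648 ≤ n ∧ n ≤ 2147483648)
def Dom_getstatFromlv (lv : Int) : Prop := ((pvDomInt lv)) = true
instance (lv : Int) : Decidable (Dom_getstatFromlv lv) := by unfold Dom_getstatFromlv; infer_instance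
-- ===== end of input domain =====

-- B replaces A's linear early-breaking scan with bisect_right (binary search) on the same sorted thresholds; idiomatic, same results.

-- ===== PORT A =====
-- A's for-loop with break: recursion over the remaining list, carrying stat.
def getstatLoop (lv : Int) : List Int → Int → Int
  | [], stat => stat
  | ele :: rest, stat => if ele ≤ lv then getstatLoop lv rest (stat + 1) else stat

def getstatFromlv (lv : Int) : Int :=
  getstatLoop lv [60, 100, 140, 200, 250] 0

-- ===== PORT B =====
-- bisect.bisect_right's while lo < hi loop (CPython's algorithm), transliterated.
def bisectRightGo (a : List Int) (x : Int) (lo hi : Nat) : Nat :=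
  if _h : lo < hi then
    let mid := (lo + hi) / 2
    if x < a.getD mid 0 then bisectRightGo a x lo mid
    else bisectRightGo a x (mid + 1) hi
  else lo
termination_by hi - lo
decreasing_by all_goals omega

def getstatFromlv_alt (lv : Int) : Int :=
  let union : List Int := [60, 100, 140, 200, 250]
  (bisectRightGo union lv 0 union.length : Int)

-- ===== PRECONDITION & SPEC =====
def Spec_getstatFromlv (lv : Int) (out : Int) : Prop := out = getstatFromlv_alt lv
instance (lv : Int) (out : Int) : Decidable (Spec_getstatFromlv lv out) := by unfold Spec_getstatFromlv; infer_instance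

-- ===== CLAIM (what is proved, stated in full; the proofs are below) =====
def Claim_equal_getstatFromlv : Prop := ∀ (lv : Int), Dom_getstatFromlv lv → Spec_getstatFromlv lv (getstatFromlv lv)

-- ===== LEMMAS AND PROOFS =====
theorem getstat_eq (lv : Int) : getstatFromlv lv = getstatFromlv_alt lv := by
  unfold getstatFromlv getstatFromlv_alt
  simp only [getstatLoop, List.length]
  rw [bisectRightGo]
  norm_num
  split_ifs with h1
  all_goals repeat' first
    | omega
    | (rw [bisectRightGo]; norm_num)

-- ===== VERDICT (by name: the statement is the Claim_ definition above) =====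
theorem getstatFromlv_spec : Claim_equal_getstatFromlv := by
  intro lv _
  unfold Spec_getstatFromlv
  exact getstat_eq lv
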